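-- pv_equiv track=rewrite | github.com/EnTangledUpInBlue/qShop | toric_code_coordinates.py | toric_stabilizer_generators
-- ===== SOURCE A (Python) =====
-- from typing import List,Set,Dict,Tuple
--
-- def toric_code_coords(Lx:int,Ly:int) -> List[Set[Tuple[int,int]]]:
--
--     qubit_coords = set()
--     xcheck_coords = set()
--     zcheck_coords = set()
--
--     for x in range(2*Lx):
--         for y in range(2*Ly):
--             if x%2:
--                 if y%2:
--                     zcheck_coords.add((x,y))
--                 else:
--                     qubit_coords.add((x,y))
--             else:
--                 if y%2:
--                     qubit_coords.add((x,y))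
--                 else:
--                     xcheck_coords.add((x,y))
--     return [qubit_coords,xcheck_coords,zcheck_coords]
--
-- def toric_q2i(Lx:int,Ly:int) -> Dict[Tuple[int,int],int]:
--     r"""
--     Creates a dictionary mapping qubit coordinates to integer labels
--
--     :param L: The dimensions of the square lattice for the rotated surface code.
--
--     """
--     qcoords = toric_code_coords(Lx,Ly)[0]
--
--     q2i:Dict[Tuple[int,int],int] = {q: i for i,q in enumerate(sorted(qcoords, key=lambda v:(v[0],v[1])))}
--
--     return q2i
--
-- def toric_c2i(Lx:int,Ly:int) -> Dict[bool,Dict[Tuple[int,int],int]]: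
--     r"""
--     Creates a dictionary mapping check coordinates to integer labels.
--
--     :param L: The dimensions of the square lattice for the rotated surface code.
--
--     """
--     xcoords,zcoords = toric_code_coords(Lx,Ly)[1:]
--
--     x2i:Dict[Tuple[int,int],int] = {x: i for i,x in enumerate(sorted(xcoords,key = lambda v:(v[0],v[1])))}
--
--     z2i:Dict[Tuple[int,int],int] = {z: i for i,z in enumerate(sorted(zcoords,key = lambda v:(v[0],v[1])))}
--
--     return {False:x2i,True:z2i}
--
-- def toric_stabilizer_generators(Lx:int,Ly:int) -> List[List[Set[int]]]:
--
--     q2i = toric_q2i(Lx,Ly)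
--     c2i = toric_c2i(Lx,Ly)
--
--     stabs = []
--
--     for sector in [False,True]:
--         sect_stabs = []
--         for check in c2i[sector]:
--             chk = set()
--             for pot_q in potential_nbrhd(Lx,Ly,check):
--                 if pot_q in q2i:
--                     chk.add(q2i[pot_q])
--             sect_stabs.append(chk)
--         stabs.append(sect_stabs)
--
--     return stabs
--
-- def potential_nbrhd(Lx:int,Ly:int,r:Tuple[int,int]) -> List[Tuple[int,int]]:
--     r"""
--     Function for producing a set of coordinates neighboring the input tuple r
--
--     """
--
--     nbrs = []
--     deltas = [1,-1]
--
--     for x in deltas: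
--         nbrs.append(((r[0]+x)%(2*Lx),r[1]))
--         nbrs.append((r[0],(r[1]+x)%(2*Ly)))
--
--     return nbrs
-- ===== SOURCE B (Python) =====
-- def toric_stabilizer_generators(Lx, Ly):
--     # Direct construction: qubit at (x, y) has label x*Ly + y//2; checks are
--     # visited in ascending (x, y) order, X-checks (even, even) then Z-checks (odd, odd).
--     n = 2 * Lx
--     m = 2 * Ly
--     stabs = []
--     for x0 in (0, 1):
--         sect = []
--         for x in range(x0, n, 2):
--             for y in range(x0, m, 2):
--                 chk = {((x + 1) % n) * Ly + y // 2,
--                        x * Ly + ((y + 1) % m) // 2,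
--                        ((x - 1) % n) * Ly + y // 2,
--                        x * Ly + ((y - 1) % m) // 2}
--                 sect.append(chk)
--         stabs.append(sect)
--     return stabs
-- ===== Notes on version B (the rewrite author's own statement) =====
-- stated objective: simpler
-- what changed: Replaces the coordinate-set construction, the sorted coordinate-to-index dictionaries and the neighbourhood membership filter by a direct closed-form qubit label x*Ly + y//2, emitting each check's four wrap-around neighbour labels while iterating checks in (x,y) order.
import Mathlib
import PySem

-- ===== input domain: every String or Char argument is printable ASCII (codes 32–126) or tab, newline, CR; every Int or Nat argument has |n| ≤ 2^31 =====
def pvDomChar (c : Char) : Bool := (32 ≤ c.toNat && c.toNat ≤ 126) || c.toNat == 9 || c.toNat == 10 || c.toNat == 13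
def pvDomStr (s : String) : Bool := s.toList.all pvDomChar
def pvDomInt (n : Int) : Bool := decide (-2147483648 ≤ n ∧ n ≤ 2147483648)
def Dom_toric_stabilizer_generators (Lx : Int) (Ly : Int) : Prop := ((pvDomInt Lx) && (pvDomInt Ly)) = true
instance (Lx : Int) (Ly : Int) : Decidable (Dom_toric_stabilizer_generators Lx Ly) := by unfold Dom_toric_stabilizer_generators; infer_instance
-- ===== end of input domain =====

-- B replaces A's coordinate sets, sorted coordinate→index dicts and membership filter by a
-- closed-form qubit label x*Ly + y//2 emitted directly per check (objective: simpler).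

-- ===== PORT A =====
-- inner loop of toric_code_coords over y, named so lemmas can talk about it
def tccInner (Ly : Int) (st : PySem.Set (Int × Int) × PySem.Set (Int × Int) × PySem.Set (Int × Int))
    (x : Int) : PySem.Set (Int × Int) × PySem.Set (Int × Int) × PySem.Set (Int × Int) :=
  (PySem.List.pyRange 0 (2*Ly) 1).foldl (fun st y =>
    if PySem.Int.mod x 2 ≠ 0 then
      if PySem.Int.mod y 2 ≠ 0 then (st.1, st.2.1, PySem.Set.add st.2.2 (x, y))
      else (PySem.Set.add st.1 (x, y), st.2.1, st.2.2)
    else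
      if PySem.Int.mod y 2 ≠ 0 then (PySem.Set.add st.1 (x, y), st.2.1, st.2.2)
      else (st.1, PySem.Set.add st.2.1 (x, y), st.2.2)) st

def toric_code_coords (Lx : Int) (Ly : Int) : List (PySem.Set (Int × Int)) :=
  let st := (PySem.List.pyRange 0 (2*Lx) 1).foldl (tccInner Ly)
              (PySem.Set.empty, PySem.Set.empty, PySem.Set.empty)
  [st.1, st.2.1, st.2.2]

def toric_q2i (Lx : Int) (Ly : Int) : PySem.Dict (Int × Int) Int :=
  let qcoords := PySem.List.pyGetD (toric_code_coords Lx Ly) 0 []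
  (PySem.List.enumerate (PySem.List.sorted2 qcoords (fun v => v.1) (fun v => v.2))).foldl
    (fun d iq => d.insert iq.2 iq.1) PySem.Dict.empty

def toric_c2i (Lx : Int) (Ly : Int) : PySem.Dict Bool (PySem.Dict (Int × Int) Int) :=
  let tail := PySem.List.slice (toric_code_coords Lx Ly) (some 1) none
  let xcoords := PySem.List.pyGetD tail 0 []
  let zcoords := PySem.List.pyGetD tail 1 []
  let x2i := (PySem.List.enumerate (PySem.List.sorted2 xcoords (fun v => v.1) (fun v => v.2))).foldl
    (fun d iq => d.insert iq.2 iq.1) PySem.Dict.empty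
  let z2i := (PySem.List.enumerate (PySem.List.sorted2 zcoords (fun v => v.1) (fun v => v.2))).foldl
    (fun d iq => d.insert iq.2 iq.1) PySem.Dict.empty
  (PySem.Dict.empty.insert false x2i).insert true z2i

def potential_nbrhd (Lx : Int) (Ly : Int) (r : Int × Int) : List (Int × Int) :=
  [(1 : Int), -1].foldl (fun nbrs x =>
    (nbrs ++ [(PySem.Int.mod (r.1 + x) (2*Lx), r.2)]) ++ [(r.1, PySem.Int.mod (r.2 + x) (2*Ly))]) []

def toric_stabilizer_generators (Lx : Int) (Ly : Int) : List (List (List Int)) :=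
  let q2i := toric_q2i Lx Ly
  let c2i := toric_c2i Lx Ly
  [false, true].foldl (fun stabs sector =>
    -- c2i[sector]: the key is always present, so Python's subscript returns; getD transliterates it
    let sect := (PySem.Dict.getD c2i sector PySem.Dict.empty).keys.foldl (fun ss check =>
      let chk := (potential_nbrhd Lx Ly check).foldl (fun chk pq =>
        if PySem.Dict.contains q2i pq then PySem.Set.add chk (PySem.Dict.getD q2i pq 0) else chk)
        PySem.Set.empty
      ss ++ [chk]) []
    stabs ++ [sect]) []

-- ===== PORT B =====
def toric_stabilizer_generators_alt (Lx : Int) (Ly : Int) : List (List (List Int)) :=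
  let n := 2*Lx
  let m := 2*Ly
  [(0 : Int), 1].foldl (fun stabs x0 =>
    let sect := (PySem.List.pyRange x0 n 2).foldl (fun sect x =>
      (PySem.List.pyRange x0 m 2).foldl (fun sect y =>
        let chk : PySem.Set Int := PySem.Set.ofList
          [ (PySem.Int.mod (x+1) n) * Ly + PySem.Int.floordiv y 2,
            x * Ly + PySem.Int.floordiv (PySem.Int.mod (y+1) m) 2,
            (PySem.Int.mod (x-1) n) * Ly + PySem.Int.floordiv y 2,
            x * Ly + PySem.Int.floordiv (PySem.Int.mod (y-1) m) 2 ]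
        sect ++ [chk]) sect) []
    stabs ++ [sect]) []

-- ===== PRECONDITION & SPEC =====
def Spec_toric_stabilizer_generators (Lx : Int) (Ly : Int) (out : List (List (List Int))) : Prop := out = toric_stabilizer_generators_alt Lx Ly
instance (Lx : Int) (Ly : Int) (out : List (List (List Int))) : Decidable (Spec_toric_stabilizer_generators Lx Ly out) := by unfold Spec_toric_stabilizer_generators; infer_instance

-- ===== CLAIM (what is proved, stated in full; the proofs are below) =====
def Claim_equal_toric_stabilizer_generators : Prop := ∀ (Lx : Int) (Ly : Int), Dom_toric_stabilizer_generators Lx Ly → Spec_toric_stabilizer_generators Lx Ly (toric_stabilizer_generators Lx Ly)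

-- ===== LEMMAS AND PROOFS =====

-- proof-side normal forms and helper lemmas

lemma nat_filter_parity (r : Nat) (hr : r = 0 ∨ r = 1) (a : Nat) :
    (List.range (2*a)).filter (fun k => k % 2 == r) = (List.range a).map (fun k => r + 2*k) := by
  induction a with
  | zero => simp
  | succ n ih =>
    have h2 : 2*(n+1) = (2*n + 1) + 1 := by ring
    rw [h2, List.range_succ, List.range_succ, List.filter_append, List.filter_append, ih,
      List.range_succ, List.map_append]
    rcases hr with h|h <;> subst h <;>
      simp [Nat.add_mod, Nat.mul_mod_right]
    all_goals omega

lemma pyRange2_map (L : Int) (hL : 0 < L) (r : Int) (hr : r = 0 ∨ r = 1) :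
    PySem.List.pyRange r (2*L) 2 = (List.range L.toNat).map (fun k : Nat => r + 2*(k:Int)) := by
  rw [PySem.List.pyRange_of_pos r (2*L) (by norm_num), if_pos (by omega : r < 2*L),
    show ((2*L - r + 2 - 1)/2).toNat = L.toNat from by rcases hr with h|h <;> subst h <;> omega]

lemma filter_parity (L : Int) (r : Int) (hr : r = 0 ∨ r = 1) :
    (PySem.List.pyRange 0 (2*L) 1).filter (fun y => PySem.Int.mod y 2 == r)
      = PySem.List.pyRange r (2*L) 2 := by
  by_cases hL : L ≤ 0
  · rw [PySem.List.pyRange_one_eq_nil (by omega), PySem.List.pyRange_of_pos r (2*L) (by norm_num),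
      if_neg (by omega)]
    simp
  · rw [pyRange2_map L (by omega) r hr]
    have h2L : (2:Int)*L = ((2*L.toNat : Nat) : Int) := by omega
    rw [h2L, PySem.List.pyRange_zero_nat, List.filter_map]
    have hp : List.filter ((fun y => PySem.Int.mod y 2 == r) ∘ (fun k : Nat => (k : Int)))
        (List.range (2*L.toNat))
        = List.filter (fun k => k % 2 == r.toNat) (List.range (2*L.toNat)) := by
      apply List.filter_congr
      intro k _
      have hm : PySem.Int.mod (k:Int) 2 = ((k % 2 : Nat) : Int) := by
        exact_mod_cast PySem.Int.mod_natCast k 2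
      simp only [Function.comp, hm]
      rcases hr with h|h <;> subst h <;> rcases Nat.mod_two_eq_zero_or_one k with h2|h2 <;>
        simp [h2]
    rw [hp, nat_filter_parity r.toNat (by omega)]
    simp only [List.map_map]
    apply List.map_congr_left
    intro k _
    simp only [Function.comp]
    push_cast
    rcases hr with h|h <;> subst h <;> norm_num

lemma qcol_def2 (Ly x : Int) :
    ((PySem.List.pyRange 0 (2*Ly) 1).filter (fun y => PySem.Int.mod y 2 != PySem.Int.mod x 2)).map (fun y => (x, y))
      = (PySem.List.pyRange (1 - PySem.Int.mod x 2) (2*Ly) 2).map (fun y => (x, y)) := by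
  rw [show (PySem.List.pyRange 0 (2*Ly) 1).filter (fun y => PySem.Int.mod y 2 != PySem.Int.mod x 2)
      = (PySem.List.pyRange 0 (2*Ly) 1).filter (fun y => PySem.Int.mod y 2 == 1 - PySem.Int.mod x 2) from
    List.filter_congr (by
      intro y _
      rcases PySem.Int.mod_two_eq y with h1|h1 <;> rcases PySem.Int.mod_two_eq x with h2|h2 <;>
        rw [h1, h2] <;> decide)]
  rw [filter_parity Ly (1 - PySem.Int.mod x 2) (by rcases PySem.Int.mod_two_eq x with h|h <;> omega)]

lemma ccol_def2 (Ly x : Int) :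
    ((PySem.List.pyRange 0 (2*Ly) 1).filter (fun y => PySem.Int.mod y 2 == PySem.Int.mod x 2)).map (fun y => (x, y))
      = (PySem.List.pyRange (PySem.Int.mod x 2) (2*Ly) 2).map (fun y => (x, y)) := by
  rw [filter_parity Ly (PySem.Int.mod x 2) (PySem.Int.mod_two_eq x)]

lemma pyRange2_pairwise (a b : Int) : (PySem.List.pyRange a b 2).Pairwise (· < ·) := by
  rw [PySem.List.pyRange_of_pos a b (by norm_num)]
  simp only [List.pairwise_map]
  apply List.Pairwise.imp ?_ (List.pairwise_lt_range)
  intro i j hij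
  omega

lemma foldl_insertBy_sorted {α : Type} (before : α → α → Bool) (xs acc : List α)
    (hcross : ∀ a ∈ xs, ∀ y ∈ acc, before a y = false)
    (hx : xs.Pairwise (fun a b => before b a = false)) :
    xs.foldl (fun acc x => PySem.List.insertBy before x acc) acc = acc ++ xs := by
  induction xs generalizing acc with
  | nil => simp
  | cons x xs ih =>
    rw [List.foldl_cons, PySem.List.insertBy_of_forall_not_before before x acc
      (fun y hy => hcross x (by simp) y hy), ih (acc ++ [x])]
    · simp
    · intro a ha y hy
      rcases List.mem_append.1 hy with h|h
      · exact hcross a (by simp [ha]) y h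
      · rcases List.mem_singleton.1 h with rfl
        exact (List.pairwise_cons.1 hx).1 a ha
    · exact (List.pairwise_cons.1 hx).2

lemma sorted2_eq_self (xs : List (Int × Int))
    (h : xs.Pairwise (fun a b => a.1 < b.1 ∨ (a.1 = b.1 ∧ a.2 < b.2))) :
    PySem.List.sorted2 xs (fun v => v.1) (fun v => v.2) = xs := by
  show xs.foldl (fun acc x => PySem.List.insertBy _ x acc) [] = xs
  rw [foldl_insertBy_sorted _ xs []]
  · simp
  · intro a _ y hy
    simp at hy
  · apply List.Pairwise.imp ?_ h
    intro a b hab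
    show (decide (b.1 < a.1) || (!decide (a.1 < b.1) && decide (b.2 < a.2))) = false
    rcases hab with h1|⟨h1,h2⟩ <;>
      simp only [Bool.or_eq_false_iff, Bool.and_eq_false_iff, decide_eq_false_iff_not,
        Bool.not_eq_false', decide_eq_true_eq] <;> omega

lemma flatMap_pairwise_lex (xs : List Int) (hxs : xs.Pairwise (· < ·)) (col : Int → List (Int × Int))
    (hfst : ∀ x, ∀ p ∈ col x, p.1 = x)
    (hcol : ∀ x, (col x).Pairwise (fun a b => a.2 < b.2)) :
    (xs.flatMap col).Pairwise (fun a b => a.1 < b.1 ∨ (a.1 = b.1 ∧ a.2 < b.2)) := by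
  induction xs with
  | nil => simp
  | cons x xs ih =>
    rw [List.flatMap_cons, List.pairwise_append]
    refine ⟨?_, ih (List.pairwise_cons.1 hxs).2, ?_⟩
    · apply List.Pairwise.imp_of_mem ?_ (hcol x)
      intro a b ha hb hab
      right
      exact ⟨(hfst x a ha).trans (hfst x b hb).symm, hab⟩
    · intro p hp q hq
      rcases List.mem_flatMap.1 hq with ⟨x', hx', hq'⟩
      left
      rw [hfst x p hp, hfst x' q hq']
      exact (List.pairwise_cons.1 hxs).1 x' hx'

lemma nodup_of_pairwise_lex (l : List (Int × Int))
    (h : l.Pairwise (fun a b => a.1 < b.1 ∨ (a.1 = b.1 ∧ a.2 < b.2))) : l.Nodup := by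
  apply List.Pairwise.imp ?_ h
  intro a b hab heq
  subst heq
  rcases hab with h1|⟨h1,h2⟩ <;> omega

lemma tcc_inner_fold (x : Int) (ys : List Int)
    (st : PySem.Set (Int × Int) × PySem.Set (Int × Int) × PySem.Set (Int × Int))
    (hnd : ys.Nodup)
    (h1 : ∀ y ∈ ys, (x, y) ∉ st.1) (h2 : ∀ y ∈ ys, (x, y) ∉ st.2.1) (h3 : ∀ y ∈ ys, (x, y) ∉ st.2.2) :
    ys.foldl (fun st y =>
      if PySem.Int.mod x 2 ≠ 0 then
        if PySem.Int.mod y 2 ≠ 0 then (st.1, st.2.1, PySem.Set.add st.2.2 (x, y))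
        else (PySem.Set.add st.1 (x, y), st.2.1, st.2.2)
      else
        if PySem.Int.mod y 2 ≠ 0 then (PySem.Set.add st.1 (x, y), st.2.1, st.2.2)
        else (st.1, PySem.Set.add st.2.1 (x, y), st.2.2)) st
    = (st.1 ++ ((ys.filter (fun y => PySem.Int.mod y 2 != PySem.Int.mod x 2)).map (fun y => (x, y))),
       st.2.1 ++ (if PySem.Int.mod x 2 = 0 then (ys.filter (fun y => PySem.Int.mod y 2 == PySem.Int.mod x 2)).map (fun y => (x, y)) else []),
       st.2.2 ++ (if PySem.Int.mod x 2 = 0 then [] else (ys.filter (fun y => PySem.Int.mod y 2 == PySem.Int.mod x 2)).map (fun y => (x, y)))) := by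
  induction ys generalizing st with
  | nil => simp
  | cons y ys ih =>
    have hndt : ys.Nodup := (List.nodup_cons.1 hnd).2
    have hyny : y ∉ ys := (List.nodup_cons.1 hnd).1
    have fresh : ∀ (c : List (Int × Int)), (∀ y' ∈ y :: ys, (x, y') ∉ c) →
        ∀ y' ∈ ys, (x, y') ∉ c ++ [(x, y)] := by
      intro c hc y' hy' hmem
      rcases List.mem_append.1 hmem with h|h
      · exact hc y' (by simp [hy']) h
      · simp at h
        exact hyny (h ▸ hy')
    rw [List.foldl_cons]
    rcases PySem.Int.mod_two_eq x with hx|hx <;> rcases PySem.Int.mod_two_eq y with hy|hy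
    · -- x even, y even: add to xcheck
      rw [if_neg (by omega), if_neg (by omega),
        PySem.Set.add_of_not_mem (h2 y (by simp) : (x,y) ∉ st.2.1),
        ih (st.1, st.2.1 ++ [(x,y)], st.2.2) hndt
          (fun y' hy' => h1 y' (by simp [hy'])) (fresh st.2.1 h2)
          (fun y' hy' => h3 y' (by simp [hy'])),
        List.filter_cons, List.filter_cons, hx, hy]
      norm_num [List.append_assoc]
    · -- x even, y odd: qubit
      rw [if_neg (by omega), if_pos (by omega),
        PySem.Set.add_of_not_mem (h1 y (by simp) : (x,y) ∉ st.1),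
        ih (st.1 ++ [(x,y)], st.2.1, st.2.2) hndt
          (fresh st.1 h1)
          (fun y' hy' => h2 y' (by simp [hy']))
          (fun y' hy' => h3 y' (by simp [hy'])),
        List.filter_cons, List.filter_cons, hx, hy]
      norm_num [List.append_assoc]
    · -- x odd, y even: qubit
      rw [if_pos (by omega), if_neg (by omega),
        PySem.Set.add_of_not_mem (h1 y (by simp) : (x,y) ∉ st.1),
        ih (st.1 ++ [(x,y)], st.2.1, st.2.2) hndt
          (fresh st.1 h1)
          (fun y' hy' => h2 y' (by simp [hy']))
          (fun y' hy' => h3 y' (by simp [hy'])),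
        List.filter_cons, List.filter_cons, hx, hy]
      norm_num [List.append_assoc]
    · -- x odd, y odd: zcheck
      rw [if_pos (by omega), if_pos (by omega),
        PySem.Set.add_of_not_mem (h3 y (by simp) : (x,y) ∉ st.2.2),
        ih (st.1, st.2.1, st.2.2 ++ [(x,y)]) hndt
          (fun y' hy' => h1 y' (by simp [hy']))
          (fun y' hy' => h2 y' (by simp [hy']))
          (fresh st.2.2 h3),
        List.filter_cons, List.filter_cons, hx, hy]
      norm_num [List.append_assoc]

def qcol (Ly x : Int) : List (Int × Int) :=
  ((PySem.List.pyRange 0 (2*Ly) 1).filter (fun y => PySem.Int.mod y 2 != PySem.Int.mod x 2)).map (fun y => (x, y))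

def ccol (Ly x : Int) : List (Int × Int) :=
  ((PySem.List.pyRange 0 (2*Ly) 1).filter (fun y => PySem.Int.mod y 2 == PySem.Int.mod x 2)).map (fun y => (x, y))

def Qlist (Lx Ly : Int) : List (Int × Int) := (PySem.List.pyRange 0 (2*Lx) 1).flatMap (qcol Ly)

def Xlist (Lx Ly : Int) : List (Int × Int) := (PySem.List.pyRange 0 (2*Lx) 2).flatMap (ccol Ly)

def Zlist (Lx Ly : Int) : List (Int × Int) := (PySem.List.pyRange 1 (2*Lx) 2).flatMap (ccol Ly)

lemma mem_qcol_fst (Ly x : Int) (p : Int × Int) (hp : p ∈ qcol Ly x) : p.1 = x := by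
  simp only [qcol, List.mem_map] at hp
  rcases hp with ⟨y, _, rfl⟩
  rfl

lemma mem_ccol_fst (Ly x : Int) (p : Int × Int) (hp : p ∈ ccol Ly x) : p.1 = x := by
  simp only [ccol, List.mem_map] at hp
  rcases hp with ⟨y, _, rfl⟩
  rfl

lemma tcc_outer_fold (Ly : Int) (xs : List Int)
    (st : PySem.Set (Int × Int) × PySem.Set (Int × Int) × PySem.Set (Int × Int))
    (hnd : xs.Nodup)
    (h1 : ∀ p ∈ st.1, p.1 ∉ xs) (h2 : ∀ p ∈ st.2.1, p.1 ∉ xs) (h3 : ∀ p ∈ st.2.2, p.1 ∉ xs) :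
    xs.foldl (tccInner Ly) st
    = (st.1 ++ xs.flatMap (qcol Ly),
       st.2.1 ++ (xs.filter (fun x => PySem.Int.mod x 2 == 0)).flatMap (ccol Ly),
       st.2.2 ++ (xs.filter (fun x => PySem.Int.mod x 2 == 1)).flatMap (ccol Ly)) := by
  induction xs generalizing st with
  | nil => simp
  | cons x xs ih =>
    have hxxs : x ∉ xs := (List.nodup_cons.1 hnd).1
    rw [List.foldl_cons]
    have hinner : tccInner Ly st x
        = (st.1 ++ qcol Ly x,
           st.2.1 ++ (if PySem.Int.mod x 2 = 0 then ccol Ly x else []),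
           st.2.2 ++ (if PySem.Int.mod x 2 = 0 then [] else ccol Ly x)) := by
      unfold tccInner qcol ccol
      exact tcc_inner_fold x _ st (PySem.List.nodup_pyRange_one 0 (2*Ly))
        (fun y _ hm => h1 (x,y) hm (by simp))
        (fun y _ hm => h2 (x,y) hm (by simp))
        (fun y _ hm => h3 (x,y) hm (by simp))
    rw [hinner, ih _ (List.nodup_cons.1 hnd).2 ?f1 ?f2 ?f3]
    case f1 =>
      intro p hp
      rcases List.mem_append.1 hp with h|h
      · exact fun hc => h1 p h (by simp [hc])
      · rw [mem_qcol_fst Ly x p h]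
        exact hxxs
    case f2 =>
      intro p hp
      rcases List.mem_append.1 hp with h|h
      · exact fun hc => h2 p h (by simp [hc])
      · rcases PySem.Int.mod_two_eq x with hx|hx
        · rw [if_pos hx] at h
          rw [mem_ccol_fst Ly x p h]
          exact hxxs
        · rw [if_neg (by omega)] at h
          simp at h
    case f3 =>
      intro p hp
      rcases List.mem_append.1 hp with h|h
      · exact fun hc => h3 p h (by simp [hc])
      · rcases PySem.Int.mod_two_eq x with hx|hx
        · rw [if_pos hx] at h
          simp at h
        · rw [if_neg (by omega)] at h
          rw [mem_ccol_fst Ly x p h]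
          exact hxxs
    rcases PySem.Int.mod_two_eq x with hx|hx
    · rw [if_pos hx, if_pos hx, List.filter_cons, List.filter_cons, hx,
        if_pos (by decide), if_neg (by decide)]
      simp only [List.flatMap_cons, List.append_assoc, List.nil_append]
    · rw [if_neg (by omega), if_neg (by omega), List.filter_cons, List.filter_cons, hx,
        if_neg (by decide), if_pos (by decide)]
      simp only [List.flatMap_cons, List.append_assoc, List.nil_append]

lemma tcc_eq (Lx Ly : Int) :
    toric_code_coords Lx Ly = [Qlist Lx Ly, Xlist Lx Ly, Zlist Lx Ly] := by
  unfold toric_code_coords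
  rw [tcc_outer_fold Ly _ _ (PySem.List.nodup_pyRange_one 0 (2*Lx))
    (by intro p hp; simp [PySem.Set.empty] at hp)
    (by intro p hp; simp [PySem.Set.empty] at hp)
    (by intro p hp; simp [PySem.Set.empty] at hp)]
  rw [filter_parity Lx 0 (by omega), filter_parity Lx 1 (by omega)]
  rfl

def enumDict (l : List (Int × Int)) : PySem.Dict (Int × Int) Int :=
  (PySem.List.enumerate l).foldl (fun d iq => d.insert iq.2 iq.1) PySem.Dict.empty

lemma enumDict_items (l : List (Int × Int)) (hnd : l.Nodup) :
    (enumDict l).items = (PySem.List.enumerate l).map (fun iq => (iq.2, iq.1)) := by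
  unfold enumDict
  rw [PySem.Dict.items_foldl_insert_fresh (PySem.List.enumerate l) (fun iq => iq.2) (fun iq => iq.1)
    PySem.Dict.empty (fun a _ => PySem.Dict.contains_empty a.2)
    (by rw [PySem.List.map_snd_enumerate]; exact hnd)]
  rfl

lemma enumDict_keys (l : List (Int × Int)) (hnd : l.Nodup) : (enumDict l).keys = l := by
  show (enumDict l).items.map (fun p => p.1) = l
  rw [enumDict_items l hnd, List.map_map]
  exact PySem.List.map_snd_enumerate l 0

lemma enumDict_get? (l : List (Int × Int)) (hnd : l.Nodup) (pre : List (Int × Int)) (p : Int × Int)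
    (post : List (Int × Int)) (h : l = pre ++ p :: post) (hp : p ∉ pre) :
    (enumDict l).get? p = some (pre.length : Int) := by
  show Option.map (fun x => x.2) (List.find? (fun q => q.1 == p) (enumDict l).items) = _
  rw [enumDict_items l hnd, h, PySem.List.enumerate_append, PySem.List.enumerate_cons,
    List.map_append, List.find?_append]
  have hfirst : List.find? (fun q => q.1 == p) ((PySem.List.enumerate pre 0).map (fun iq => (iq.2, iq.1))) = none := by
    rw [List.find?_eq_none]
    intro q hq
    rcases List.mem_map.1 hq with ⟨a, ha, rfl⟩
    rcases (PySem.List.mem_enumerate_iff pre 0 a).1 ha with ⟨k, hk, rfl⟩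
    simp only [beq_iff_eq]
    intro hc
    exact hp (hc ▸ List.getElem_mem hk)
  rw [hfirst]
  simp only [Option.none_or, List.map_cons, List.find?_cons, beq_self_eq_true]
  simp

lemma qcol_eq (Ly x : Int) :
    qcol Ly x = (PySem.List.pyRange (1 - PySem.Int.mod x 2) (2*Ly) 2).map (fun y => (x, y)) := by
  unfold qcol
  exact qcol_def2 Ly x

lemma ccol_eq (Ly x : Int) :
    ccol Ly x = (PySem.List.pyRange (PySem.Int.mod x 2) (2*Ly) 2).map (fun y => (x, y)) := by
  unfold ccol
  exact ccol_def2 Ly x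

lemma qcol_length (Ly x : Int) (hLy : 0 < Ly) : (qcol Ly x).length = Ly.toNat := by
  rw [qcol_eq, pyRange2_map Ly hLy (1 - PySem.Int.mod x 2)
    (by rcases PySem.Int.mod_two_eq x with h|h <;> omega)]
  simp

lemma map_range_split {α : Type} (G : Nat → α) (b j : Nat) (h : j < b) :
    (List.range b).map G = (List.range j).map G ++ G j :: (List.range (b-1-j)).map (fun k => G (j+1+k)) := by
  nth_rewrite 1 [show b = j + ((b-1-j)+1) from by omega]
  rw [List.range_add, List.map_append, List.range_succ_eq_map, List.map_map, List.map_cons, List.map_map]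
  simp only [Nat.add_zero, Function.comp_apply]
  congr 1
  congr 1
  apply List.map_congr_left
  intro k _
  show G (j + (k+1)) = G (j+1+k)
  exact congrArg G (by omega)

lemma qlist_decomp (Lx Ly x y : Int) (hLx : 0 < Lx) (hLy : 0 < Ly)
    (hx0 : 0 ≤ x) (hx1 : x < 2*Lx) (hy0 : 0 ≤ y) (hy1 : y < 2*Ly)
    (hpar : PySem.Int.mod y 2 ≠ PySem.Int.mod x 2) :
    ∃ pre post, Qlist Lx Ly = pre ++ (x, y) :: post ∧ (x, y) ∉ pre ∧
      (pre.length : Int) = x * Ly + PySem.Int.floordiv y 2 := by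
  have hfd : PySem.Int.floordiv y 2 * 2 + PySem.Int.mod y 2 = y := PySem.Int.floordiv_mul_add_mod y 2
  have hr : PySem.Int.mod y 2 = 0 ∨ PySem.Int.mod y 2 = 1 := PySem.Int.mod_two_eq y
  have hj0 : 0 ≤ PySem.Int.floordiv y 2 := by omega
  obtain ⟨j, hjInt⟩ : ∃ j : Nat, (j : Int) = PySem.Int.floordiv y 2 :=
    ⟨(PySem.Int.floordiv y 2).toNat, Int.toNat_of_nonneg hj0⟩
  obtain ⟨b, hbInt⟩ : ∃ b : Nat, (b : Int) = Ly := ⟨Ly.toNat, Int.toNat_of_nonneg (by omega)⟩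
  have hjb : j < b := by omega
  have hrx : 1 - PySem.Int.mod x 2 = PySem.Int.mod y 2 := by
    rcases PySem.Int.mod_two_eq x with h|h <;> omega
  have hsplit : Qlist Lx Ly = (PySem.List.pyRange 0 x 1).flatMap (qcol Ly) ++
        (qcol Ly x ++ (PySem.List.pyRange (x+1) (2*Lx) 1).flatMap (qcol Ly)) := by
    unfold Qlist
    rw [PySem.List.pyRange_one_append 0 x (2*Lx) hx0 (by omega),
      PySem.List.pyRange_one_cons (a := x) (b := 2*Lx) (by omega),
      List.flatMap_append, List.flatMap_cons]
  have hqb : qcol Ly x = (List.range b).map (fun k : Nat => ((x : Int), PySem.Int.mod y 2 + 2*(k:Int))) := by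
    rw [qcol_eq, hrx, show (2:Int)*Ly = 2*(b:Int) from by omega,
      pyRange2_map (b:Int) (by omega) (PySem.Int.mod y 2) hr, List.map_map]
    rfl
  have hcol : qcol Ly x
      = ((List.range j).map (fun k : Nat => ((x : Int), PySem.Int.mod y 2 + 2*(k:Int)))) ++
        ((x, y) :: ((List.range (b - 1 - j)).map
          (fun k : Nat => ((x : Int), PySem.Int.mod y 2 + 2*((j:Int) + 1 + (k:Int)))))) := by
    rw [hqb, map_range_split _ b j hjb]
    refine congrArg₂ (· ++ ·) rfl (congrArg₂ (· :: ·) ?_ ?_)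
    · rw [Prod.mk.injEq]
      exact ⟨rfl, by omega⟩
    · apply List.map_congr_left
      intro k _
      have hc : ((j + 1 + k : Nat) : Int) = (j:Int) + 1 + (k:Int) := by push_cast; ring
      rw [Prod.mk.injEq]
      exact ⟨rfl, by rw [hc]⟩
  have hdecomp : Qlist Lx Ly = ((PySem.List.pyRange 0 x 1).flatMap (qcol Ly) ++
        (List.range j).map (fun k : Nat => ((x : Int), PySem.Int.mod y 2 + 2*(k:Int)))) ++ (x, y) ::
        (((List.range (b - 1 - j)).map
            (fun k : Nat => ((x : Int), PySem.Int.mod y 2 + 2*((j:Int) + 1 + (k:Int)))))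
          ++ (PySem.List.pyRange (x+1) (2*Lx) 1).flatMap (qcol Ly)) := by
    rw [hsplit, hcol]
    simp only [List.append_assoc, List.cons_append]
  refine ⟨_, _, hdecomp, ?_, ?_⟩
  · intro hmem
    rcases List.mem_append.1 hmem with h|h
    · rcases List.mem_flatMap.1 h with ⟨x', hx', hq⟩
      have hfst := mem_qcol_fst Ly x' _ hq
      have hlt : x' < x := (PySem.List.mem_pyRange_one.mp hx').2
      simp at hfst
      omega
    · rcases List.mem_map.1 h with ⟨k, hk, heq⟩
      rw [Prod.mk.injEq] at heq
      have hkj : k < j := List.mem_range.1 hk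
      omega
  · rw [List.length_append, List.length_map, List.length_range, List.length_flatMap]
    have hmap : ((PySem.List.pyRange 0 x 1).map (fun x' => (qcol Ly x').length)).sum
        = ((PySem.List.pyRange 0 x 1).map (fun _ => Ly.toNat)).sum := by
      apply congrArg
      apply List.map_congr_left
      intro x' _
      exact qcol_length Ly x' hLy
    rw [hmap, show (fun _ : Int => Ly.toNat) = Function.const Int Ly.toNat from rfl,
      List.map_const, List.sum_replicate, smul_eq_mul, PySem.List.length_pyRange_one]
    push_cast
    have e1 : (((x - 0).toNat : Nat) : Int) = x := by omega
    have e2 : ((Ly.toNat : Nat) : Int) = Ly := by omega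
    rw [e1, e2, hjInt]

lemma qcol_pairwise (Ly x : Int) : (qcol Ly x).Pairwise (fun a b => a.2 < b.2) := by
  rw [qcol_eq]
  rw [List.pairwise_map]
  apply List.Pairwise.imp ?_ (pyRange2_pairwise _ _)
  intro a b hab
  exact hab

lemma ccol_pairwise (Ly x : Int) : (ccol Ly x).Pairwise (fun a b => a.2 < b.2) := by
  rw [ccol_eq]
  rw [List.pairwise_map]
  apply List.Pairwise.imp ?_ (pyRange2_pairwise _ _)
  intro a b hab
  exact hab

lemma Qlist_pairwise (Lx Ly : Int) :
    (Qlist Lx Ly).Pairwise (fun a b => a.1 < b.1 ∨ (a.1 = b.1 ∧ a.2 < b.2)) :=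
  flatMap_pairwise_lex _ (PySem.List.pairwise_lt_pyRange_one 0 (2*Lx)) _
    (fun x p hp => mem_qcol_fst Ly x p hp) (fun x => qcol_pairwise Ly x)

lemma Xlist_pairwise (Lx Ly : Int) :
    (Xlist Lx Ly).Pairwise (fun a b => a.1 < b.1 ∨ (a.1 = b.1 ∧ a.2 < b.2)) :=
  flatMap_pairwise_lex _ (pyRange2_pairwise 0 (2*Lx)) _
    (fun x p hp => mem_ccol_fst Ly x p hp) (fun x => ccol_pairwise Ly x)

lemma Zlist_pairwise (Lx Ly : Int) :
    (Zlist Lx Ly).Pairwise (fun a b => a.1 < b.1 ∨ (a.1 = b.1 ∧ a.2 < b.2)) :=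
  flatMap_pairwise_lex _ (pyRange2_pairwise 1 (2*Lx)) _
    (fun x p hp => mem_ccol_fst Ly x p hp) (fun x => ccol_pairwise Ly x)

lemma q2i_getD (Lx Ly x y : Int) (hLx : 0 < Lx) (hLy : 0 < Ly)
    (hx0 : 0 ≤ x) (hx1 : x < 2*Lx) (hy0 : 0 ≤ y) (hy1 : y < 2*Ly)
    (hpar : PySem.Int.mod y 2 ≠ PySem.Int.mod x 2) :
    PySem.Dict.getD (enumDict (Qlist Lx Ly)) (x, y) 0 = x * Ly + PySem.Int.floordiv y 2 ∧
      PySem.Dict.contains (enumDict (Qlist Lx Ly)) (x, y) = true := by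
  have hnd : (Qlist Lx Ly).Nodup := nodup_of_pairwise_lex _ (Qlist_pairwise Lx Ly)
  obtain ⟨pre, post, hdec, hpre, hlen⟩ :=
    qlist_decomp Lx Ly x y hLx hLy hx0 hx1 hy0 hy1 hpar
  constructor
  · show ((enumDict (Qlist Lx Ly)).get? (x, y)).getD 0 = _
    rw [enumDict_get? _ hnd pre _ post hdec hpre]
    simpa using hlen
  · rw [PySem.Dict.contains_eq_decide_mem_keys, enumDict_keys _ hnd]
    simp [hdec]

def chkNF (Lx Ly x y : Int) : List Int :=
  PySem.Set.ofList
    [ (PySem.Int.mod (x+1) (2*Lx)) * Ly + PySem.Int.floordiv y 2,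
      x * Ly + PySem.Int.floordiv (PySem.Int.mod (y+1) (2*Ly)) 2,
      (PySem.Int.mod (x-1) (2*Lx)) * Ly + PySem.Int.floordiv y 2,
      x * Ly + PySem.Int.floordiv (PySem.Int.mod (y-1) (2*Ly)) 2 ]

def sectNF (Lx Ly x0 : Int) : List (List Int) :=
  (PySem.List.pyRange x0 (2*Lx) 2).flatMap (fun x =>
    (PySem.List.pyRange x0 (2*Ly) 2).map (fun y => chkNF Lx Ly x y))

lemma mod_shift_parity (a n : Int) (hn : 0 < n) :
    PySem.Int.mod (PySem.Int.mod a (2*n)) 2 = PySem.Int.mod a 2 := by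
  rw [PySem.Int.mod_eq_emod_of_pos (a := a) (b := 2*n) (by omega),
    PySem.Int.mod_eq_emod_of_pos (a := a % (2*n)) (b := 2) (by norm_num),
    PySem.Int.mod_eq_emod_of_pos (a := a) (b := 2) (by norm_num),
    Int.emod_emod_of_dvd a ⟨n, by ring⟩]

lemma chk_eq (Lx Ly x y x0 : Int) (h0 : x0 = 0 ∨ x0 = 1)
    (hx : x ∈ PySem.List.pyRange x0 (2*Lx) 2) (hy : y ∈ PySem.List.pyRange x0 (2*Ly) 2) :
    (potential_nbrhd Lx Ly (x, y)).foldl (fun chk pq =>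
      if PySem.Dict.contains (enumDict (Qlist Lx Ly)) pq then
        PySem.Set.add chk (PySem.Dict.getD (enumDict (Qlist Lx Ly)) pq 0) else chk)
      PySem.Set.empty = chkNF Lx Ly x y := by
  rcases (PySem.List.mem_pyRange_iff_of_pos (by norm_num) x).1 hx with ⟨hxa, hxb, hxd⟩
  rcases (PySem.List.mem_pyRange_iff_of_pos (by norm_num) y).1 hy with ⟨hya, hyb, hyd⟩
  have hLx : 0 < Lx := by omega
  have hLy : 0 < Ly := by omega
  have px : PySem.Int.mod x 2 = x0 := by
    rw [PySem.Int.mod_eq_emod_of_pos (a := x) (b := 2) (by norm_num)]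
    omega
  have py : PySem.Int.mod y 2 = x0 := by
    rw [PySem.Int.mod_eq_emod_of_pos (a := y) (b := 2) (by norm_num)]
    omega
  have hemod2 : ∀ a : Int, PySem.Int.mod a 2 = a % 2 :=
    fun a => PySem.Int.mod_eq_emod_of_pos (a := a) (b := 2) (by norm_num)
  -- the four neighbours
  have hn : potential_nbrhd Lx Ly (x, y) =
      [(PySem.Int.mod (x+1) (2*Lx), y), (x, PySem.Int.mod (y+1) (2*Ly)),
       (PySem.Int.mod (x-1) (2*Lx), y), (x, PySem.Int.mod (y-1) (2*Ly))] := rfl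
  have hb : ∀ a : Int, 0 ≤ PySem.Int.mod a (2*Lx) ∧ PySem.Int.mod a (2*Lx) < 2*Lx :=
    fun a => ⟨PySem.Int.mod_nonneg a (by omega), PySem.Int.mod_lt a (by omega)⟩
  have hby : ∀ a : Int, 0 ≤ PySem.Int.mod a (2*Ly) ∧ PySem.Int.mod a (2*Ly) < 2*Ly :=
    fun a => ⟨PySem.Int.mod_nonneg a (by omega), PySem.Int.mod_lt a (by omega)⟩
  have g1 := q2i_getD Lx Ly (PySem.Int.mod (x+1) (2*Lx)) y hLx hLy (hb _).1 (hb _).2 (by omega) (by omega)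
    (by rw [mod_shift_parity _ Lx hLx, py, hemod2]; omega)
  have g2 := q2i_getD Lx Ly x (PySem.Int.mod (y+1) (2*Ly)) hLx hLy (by omega) (by omega) (hby _).1 (hby _).2
    (by rw [mod_shift_parity _ Ly hLy, px, hemod2]; omega)
  have g3 := q2i_getD Lx Ly (PySem.Int.mod (x-1) (2*Lx)) y hLx hLy (hb _).1 (hb _).2 (by omega) (by omega)
    (by rw [mod_shift_parity _ Lx hLx, py, hemod2]; omega)
  have g4 := q2i_getD Lx Ly x (PySem.Int.mod (y-1) (2*Ly)) hLx hLy (by omega) (by omega) (hby _).1 (hby _).2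
    (by rw [mod_shift_parity _ Ly hLy, px, hemod2]; omega)
  rw [hn, List.foldl_cons, if_pos g1.2, List.foldl_cons, if_pos g2.2,
    List.foldl_cons, if_pos g3.2, List.foldl_cons, if_pos g4.2, List.foldl_nil,
    g1.1, g2.1, g3.1, g4.1]
  rfl

lemma q2i_eq (Lx Ly : Int) : toric_q2i Lx Ly = enumDict (Qlist Lx Ly) := by
  unfold toric_q2i
  rw [tcc_eq]
  dsimp only
  rw [PySem.List.pyGetD_zero_cons,
    sorted2_eq_self _ (Qlist_pairwise Lx Ly)]
  rfl

lemma c2i_eq (Lx Ly : Int) : toric_c2i Lx Ly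
    = (PySem.Dict.empty.insert false (enumDict (Xlist Lx Ly))).insert true (enumDict (Zlist Lx Ly)) := by
  unfold toric_c2i
  rw [tcc_eq]
  dsimp only
  rw [PySem.List.slice_from _ (by norm_num),
    show List.drop (Int.toNat 1) [Qlist Lx Ly, Xlist Lx Ly, Zlist Lx Ly] = [Xlist Lx Ly, Zlist Lx Ly] from rfl]
  rw [show PySem.List.pyGetD [Xlist Lx Ly, Zlist Lx Ly] 0 [] = Xlist Lx Ly from rfl,
    show PySem.List.pyGetD [Xlist Lx Ly, Zlist Lx Ly] 1 [] = Zlist Lx Ly from rfl,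
    sorted2_eq_self _ (Xlist_pairwise Lx Ly), sorted2_eq_self _ (Zlist_pairwise Lx Ly)]
  rfl

lemma sect_fold (Lx Ly x0 : Int) :
    (PySem.List.pyRange x0 (2*Lx) 2).foldl (fun sect x =>
      (PySem.List.pyRange x0 (2*Ly) 2).foldl (fun sect y => sect ++ [chkNF Lx Ly x y]) sect) []
    = sectNF Lx Ly x0 := by
  rw [PySem.List.foldl_congr_mem (PySem.List.pyRange x0 (2*Lx) 2)
    (fun sect x => (PySem.List.pyRange x0 (2*Ly) 2).foldl (fun sect y => sect ++ [chkNF Lx Ly x y]) sect)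
    (fun sect x => sect ++ (PySem.List.pyRange x0 (2*Ly) 2).map (fun y => chkNF Lx Ly x y)) []
    (fun acc x _ => PySem.List.foldl_append_singleton_eq_map _ _ _),
    PySem.List.foldl_append_eq_flatMap]
  rfl

lemma B_eq (Lx Ly : Int) :
    toric_stabilizer_generators_alt Lx Ly = [sectNF Lx Ly 0, sectNF Lx Ly 1] := by
  show (([] ++ [(PySem.List.pyRange 0 (2*Lx) 2).foldl (fun sect x =>
        (PySem.List.pyRange 0 (2*Ly) 2).foldl (fun sect y => sect ++ [chkNF Lx Ly x y]) sect) []]) ++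
      [(PySem.List.pyRange 1 (2*Lx) 2).foldl (fun sect x =>
        (PySem.List.pyRange 1 (2*Ly) 2).foldl (fun sect y => sect ++ [chkNF Lx Ly x y]) sect) []])
    = [sectNF Lx Ly 0, sectNF Lx Ly 1]
  rw [sect_fold Lx Ly 0, sect_fold Lx Ly 1]
  rfl

lemma sectA_eq (Lx Ly x0 : Int) (h0 : x0 = 0 ∨ x0 = 1) :
    ((PySem.List.pyRange x0 (2*Lx) 2).flatMap (ccol Ly)).map (fun check =>
      (potential_nbrhd Lx Ly check).foldl (fun chk pq =>
        if PySem.Dict.contains (enumDict (Qlist Lx Ly)) pq then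
          PySem.Set.add chk (PySem.Dict.getD (enumDict (Qlist Lx Ly)) pq 0) else chk)
        PySem.Set.empty)
    = sectNF Lx Ly x0 := by
  rw [List.map_flatMap]
  unfold sectNF
  apply List.flatMap_congr
  intro x hx
  have px : PySem.Int.mod x 2 = x0 := by
    rcases (PySem.List.mem_pyRange_iff_of_pos (by norm_num) x).1 hx with ⟨hxa, hxb, hxd⟩
    rw [PySem.Int.mod_eq_emod_of_pos (a := x) (b := 2) (by norm_num)]
    omega
  rw [ccol_eq, px, List.map_map]
  apply List.map_congr_left
  intro y hy
  exact chk_eq Lx Ly x y x0 h0 hx hy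

lemma A_eq (Lx Ly : Int) :
    toric_stabilizer_generators Lx Ly = [sectNF Lx Ly 0, sectNF Lx Ly 1] := by
  unfold toric_stabilizer_generators
  dsimp only
  rw [q2i_eq, c2i_eq, List.foldl_cons, List.foldl_cons, List.foldl_nil]
  have hgf : PySem.Dict.getD ((PySem.Dict.empty.insert false (enumDict (Xlist Lx Ly))).insert true
      (enumDict (Zlist Lx Ly))) false PySem.Dict.empty = enumDict (Xlist Lx Ly) := by
    show (PySem.Dict.get? _ false).getD _ = _
    rw [PySem.Dict.get?_insert_of_ne _ _ (by decide), PySem.Dict.get?_insert_self]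
    rfl
  have hgt : PySem.Dict.getD ((PySem.Dict.empty.insert false (enumDict (Xlist Lx Ly))).insert true
      (enumDict (Zlist Lx Ly))) true PySem.Dict.empty = enumDict (Zlist Lx Ly) := by
    show (PySem.Dict.get? _ true).getD _ = _
    rw [PySem.Dict.get?_insert_self]
    rfl
  rw [hgf, hgt, enumDict_keys _ (nodup_of_pairwise_lex _ (Xlist_pairwise Lx Ly)),
    enumDict_keys _ (nodup_of_pairwise_lex _ (Zlist_pairwise Lx Ly))]
  show ([] ++ [(Xlist Lx Ly).foldl (fun ss check => ss ++ [(potential_nbrhd Lx Ly check).foldl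
        (fun chk pq => if PySem.Dict.contains (enumDict (Qlist Lx Ly)) pq then
          PySem.Set.add chk (PySem.Dict.getD (enumDict (Qlist Lx Ly)) pq 0) else chk)
        PySem.Set.empty]) []]) ++
      [(Zlist Lx Ly).foldl (fun ss check => ss ++ [(potential_nbrhd Lx Ly check).foldl
        (fun chk pq => if PySem.Dict.contains (enumDict (Qlist Lx Ly)) pq then
          PySem.Set.add chk (PySem.Dict.getD (enumDict (Qlist Lx Ly)) pq 0) else chk)
        PySem.Set.empty]) []]
    = [sectNF Lx Ly 0, sectNF Lx Ly 1]
  rw [PySem.List.foldl_append_singleton_eq_map _ (Xlist Lx Ly) [],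
    PySem.List.foldl_append_singleton_eq_map _ (Zlist Lx Ly) []]
  rw [show Xlist Lx Ly = (PySem.List.pyRange 0 (2*Lx) 2).flatMap (ccol Ly) from rfl,
    show Zlist Lx Ly = (PySem.List.pyRange 1 (2*Lx) 2).flatMap (ccol Ly) from rfl,
    sectA_eq Lx Ly 0 (Or.inl rfl), sectA_eq Lx Ly 1 (Or.inr rfl)]
  rfl

-- ===== VERDICT (by name: the statement is the Claim_ definition above) =====
theorem toric_stabilizer_generators_spec : Claim_equal_toric_stabilizer_generators := by
  intro Lx Ly _
  unfold Spec_toric_stabilizer_generators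
  rw [A_eq, B_eq]
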